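-- pv_equiv track=rewrite | github.com/LizzHale/Hackbright | exercise4/list_operations.py | custom_equality
-- ===== SOURCE A (Python) =====
-- def custom_len(input_list):
--     """custom_len(input_list) imitates len(input_list)"""
--     count = 0
--     for i in input_list:
--         count += 1
--     return count
--
-- def custom_equality(some_list, another_list):
--     """custom_equality(some_list, another_list) imitates
--     (some_list == another_list)
--     """
--     if custom_len(some_list) == custom_len(another_list):
--         index = 0
--         for each in some_list:
--             if each != another_list[index]:
--                 return False
--             else:
--                 index += 1
--         return True
--     else:
--         return False
-- ===== SOURCE B (Python) =====
-- from itertools import zip_longest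
--
-- def custom_equality(some_list, another_list):
--     """custom_equality(some_list, another_list) imitates
--     (some_list == another_list)
--     """
--     sentinel = object()
--     for a, b in zip_longest(some_list, another_list, fillvalue=sentinel):
--         if a != b:
--             return False
--     return True
-- ===== Notes on version B (the rewrite author's own statement) =====
-- stated objective: simpler
-- what changed: Replaces the two length-counting loops plus an indexed scan with a single simultaneous pass over both lists via zip_longest with a fresh sentinel, folding the length check into the element comparison.
import Mathlib
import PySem

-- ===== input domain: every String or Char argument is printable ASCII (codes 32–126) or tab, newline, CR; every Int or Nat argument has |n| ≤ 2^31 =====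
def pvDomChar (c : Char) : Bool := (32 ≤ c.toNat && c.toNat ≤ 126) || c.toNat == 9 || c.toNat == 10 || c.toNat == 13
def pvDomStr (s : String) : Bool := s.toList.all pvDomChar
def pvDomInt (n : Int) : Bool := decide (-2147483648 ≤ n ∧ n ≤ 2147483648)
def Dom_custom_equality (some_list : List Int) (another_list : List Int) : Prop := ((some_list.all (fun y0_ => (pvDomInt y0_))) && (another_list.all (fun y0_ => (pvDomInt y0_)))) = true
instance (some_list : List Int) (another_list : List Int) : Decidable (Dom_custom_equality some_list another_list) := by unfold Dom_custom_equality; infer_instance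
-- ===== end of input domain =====

-- B replaces A's two length-counting loops plus indexed scan with one simultaneous pass (zip_longest with a sentinel); same return value, stated as simpler.


-- ===== PORT A =====
-- custom_len: count = 0; for i in input_list: count += 1
def custom_len (input_list : List Int) : Int :=
  input_list.foldl (fun count _ => count + 1) 0

-- the indexed for-loop of A: for each in some_list: if each != another_list[index] return False else index += 1
-- (another_list[index] via pyGet?; the none branch is Python's IndexError, unreachable under A's length guard)
def customEqLoop (xs : List Int) (another_list : List Int) (index : Int) : Bool :=
  match xs with
  | [] => true
  | each :: rest =>
    match PySem.List.pyGet? another_list index with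
    | none => false
    | some v => if each ≠ v then false else customEqLoop rest another_list (index + 1)

def custom_equality (some_list : List Int) (another_list : List Int) : Bool :=
  if custom_len some_list = custom_len another_list then
    customEqLoop some_list another_list 0
  else
    false

-- ===== PORT B =====
-- one simultaneous pass: zip_longest with a fresh sentinel; any mismatch (incl. sentinel vs element) → False
def custom_equality_alt (some_list : List Int) (another_list : List Int) : Bool :=
  match some_list, another_list with
  | [], [] => true
  | [], _ :: _ => false        -- pair (sentinel, b): differs
  | _ :: _, [] => false        -- pair (a, sentinel): differs
  | a :: xs, b :: ys => if a ≠ b then false else custom_equality_alt xs ys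

-- ===== PRECONDITION & SPEC =====
def Spec_custom_equality (some_list : List Int) (another_list : List Int) (out : Bool) : Prop := out = custom_equality_alt some_list another_list
instance (some_list : List Int) (another_list : List Int) (out : Bool) : Decidable (Spec_custom_equality some_list another_list out) := by unfold Spec_custom_equality; infer_instance

-- ===== CLAIM (what is proved, stated in full; the proofs are below) =====
def Claim_equal_custom_equality : Prop := ∀ (some_list : List Int) (another_list : List Int), Dom_custom_equality some_list another_list → Spec_custom_equality some_list another_list (custom_equality some_list another_list)

-- ===== LEMMAS AND PROOFS =====

theorem custom_len_eq (xs : List Int) : custom_len xs = (xs.length : Int) := by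
  have h : ∀ (xs : List Int) (c : Int), xs.foldl (fun count _ => count + 1) c = c + xs.length := by
    intro xs
    induction xs with
    | nil => intro c; simp
    | cons x rest ih => intro c; simp [List.foldl, ih]; omega
  simpa using h xs 0

-- the loop started at index pre.length over pre ++ ys behaves like the loop started at 0 over ys
theorem customEqLoop_shift (xs : List Int) : ∀ (pre ys : List Int),
    customEqLoop xs (pre ++ ys) (pre.length) = customEqLoop xs ys 0 := by
  induction xs with
  | nil => intro pre ys; simp [customEqLoop]
  | cons a rest ih =>
    intro pre ys
    cases ys with
    | nil =>
      have hn : PySem.List.pyGet? pre ((pre.length : Int)) = none := by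
        rw [PySem.List.pyGet?_eq_none_iff, PySem.Raise.InRange]; omega
      have hn0 : PySem.List.pyGet? ([] : List Int) (0 : Int) = none := rfl
      simp [customEqLoop, hn, hn0]
    | cons b ys' =>
      have h1 : PySem.List.pyGet? (pre ++ b :: ys') ((pre.length : Int)) = some b :=
        PySem.List.pyGet?_append_length pre ys' b
      simp only [customEqLoop, h1, PySem.List.pyGet?_zero_cons]
      by_cases hab : a = b
      · simp only [hab, ne_eq, not_true_eq_false, if_false]
        have hL := ih (pre ++ [b]) ys'
        have hR := ih [b] ys'
        simp only [List.append_assoc, List.cons_append, List.nil_append,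
          List.length_append, List.length_cons, List.length_nil] at hL hR
        push_cast at hL hR ⊢
        rw [hL, ← hR]
      · simp [hab]

theorem customEqLoop_zero (xs ys : List Int) (h : xs.length = ys.length) :
    customEqLoop xs ys 0 = custom_equality_alt xs ys := by
  induction xs generalizing ys with
  | nil => cases ys with
    | nil => rfl
    | cons b ys' => simp at h
  | cons a rest ih =>
    cases ys with
    | nil => simp at h
    | cons b ys' =>
      simp only [customEqLoop, PySem.List.pyGet?_zero_cons, custom_equality_alt]
      by_cases hab : a = b
      · have hlen : rest.length = ys'.length := by simpa using h
        have := customEqLoop_shift rest [b] ys'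
        simp only [hab, ne_eq, not_true_eq_false, if_false]
        simpa using (this.trans (ih ys' hlen))
      · simp [hab]

theorem alt_len_ne (xs ys : List Int) (h : xs.length ≠ ys.length) :
    custom_equality_alt xs ys = false := by
  induction xs generalizing ys with
  | nil => cases ys with
    | nil => simp at h
    | cons b ys' => rfl
  | cons a rest ih =>
    cases ys with
    | nil => rfl
    | cons b ys' =>
      have : rest.length ≠ ys'.length := by simpa using h
      by_cases hab : a = b
      · simp [custom_equality_alt, hab, ih ys' this]
      · simp [custom_equality_alt, hab]

-- ===== VERDICT (by name: the statement is the Claim_ definition above) =====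
theorem custom_equality_spec : Claim_equal_custom_equality := by
  intro xs ys _
  unfold Spec_custom_equality custom_equality
  rw [custom_len_eq, custom_len_eq]
  by_cases h : xs.length = ys.length
  · simp [h, customEqLoop_zero xs ys h]
  · have h' : (xs.length : Int) ≠ (ys.length : Int) := by exact_mod_cast h
    simp [h', alt_len_ne xs ys h]
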